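-- pv_equiv track=rewrite | github.com/77svene/forge | forge/eval/benchmark.py | _extract_function
-- ===== SOURCE A (Python) =====
-- from typing import Dict, List, Optional, Union, Any, Tuple
--
-- def _extract_function(generated_code: str, example: Dict[str, Any]) -> str:
--     """Extract function implementation from generated code."""
--     # Simple extraction - in production, use more robust parsing
--     lines = generated_code.split('\n')
--     function_lines = []
--     in_function = False
--
--     for line in lines:
--         if 'def ' in line and example['entry_point'] in line:
--             in_function = True
--         if in_function:
--             function_lines.append(line)
--             if line.strip() == '' and len(function_lines) > 1:
--                 break
--
--     return '\n'.join(function_lines) if function_lines else generated_code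
-- ===== SOURCE B (Python) =====
-- def _extract_function(generated_code: str, example) -> str:
--     """Extract function implementation from generated code (locate-then-slice)."""
--     lines = generated_code.split('\n')
--     start = next((i for i, ln in enumerate(lines)
--                   if 'def ' in ln and example['entry_point'] in ln), None)
--     if start is None:
--         return generated_code
--     tail = lines[start + 1:]
--     body_len = next((j for j, ln in enumerate(tail) if ln.strip() == ''), len(tail))
--     return '\n'.join(lines[start:start + 2 + body_len])
-- ===== Notes on version B (the rewrite author's own statement) =====
-- stated objective: simpler
-- what changed: Replaced the single stateful scan (in_function flag, growing accumulator, break) by a two-phase locate-then-slice: find the index of the first matching def line, find the first blank line after it, and return one slice joined.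
import Mathlib
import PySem

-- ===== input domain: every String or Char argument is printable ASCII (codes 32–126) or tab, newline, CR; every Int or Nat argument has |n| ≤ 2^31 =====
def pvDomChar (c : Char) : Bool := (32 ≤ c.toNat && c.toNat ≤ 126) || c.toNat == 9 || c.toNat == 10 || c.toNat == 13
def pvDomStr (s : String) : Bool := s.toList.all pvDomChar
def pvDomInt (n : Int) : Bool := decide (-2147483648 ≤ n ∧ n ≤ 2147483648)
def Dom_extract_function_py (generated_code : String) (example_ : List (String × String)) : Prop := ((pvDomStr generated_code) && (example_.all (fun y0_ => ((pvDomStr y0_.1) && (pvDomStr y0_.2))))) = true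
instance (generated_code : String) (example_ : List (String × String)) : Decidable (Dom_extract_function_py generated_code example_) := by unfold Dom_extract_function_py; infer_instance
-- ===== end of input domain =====

-- B rewrites A's stateful one-pass scan as a two-phase locate-then-slice (find the def line,
-- find the first blank after it, slice); objective: simpler, same cost.

-- ===== PORT A =====
-- the for-loop of A: state = (function_lines, in_function); early `break` = returning the accumulator
def pvLoopA (entry : String) : List String → List String → Bool → List String
  | [], acc, _ => acc
  | l :: ls, acc, inf =>
    let inf' := if PySem.Str.isIn "def " l && PySem.Str.isIn entry l then true else inf
    if inf' then
      let acc' := acc ++ [l]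
      if PySem.Str.strip l == "" && decide (acc'.length > 1) then acc'
      else pvLoopA entry ls acc' inf'
    else pvLoopA entry ls acc inf'

def extract_function_py (generated_code : String) (example_ : List (String × String)) : String :=
  -- example['entry_point'] is looked up lazily (only on a line containing 'def '); inside Pre_
  -- the `getD ""` default is never what decides the result, so this total form is faithful there
  let entry := ((PySem.Dict.mk example_).get? "entry_point").getD ""
  let lines := (PySem.Str.split? generated_code "\n").getD []  -- sep ≠ "", never none
  let function_lines := pvLoopA entry lines [] false
  if function_lines.isEmpty then generated_code else PySem.Str.join "\n" function_lines

-- ===== PORT B =====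
def extract_function_py_alt (generated_code : String) (example_ : List (String × String)) : String :=
  -- same lazy lookup as in Source B's generator condition; total via `getD ""`, faithful inside Pre_
  let entry := ((PySem.Dict.mk example_).get? "entry_point").getD ""
  let lines := (PySem.Str.split? generated_code "\n").getD []  -- sep ≠ "", never none
  match lines.findIdx? (fun l => PySem.Str.isIn "def " l && PySem.Str.isIn entry l) with
  | none => generated_code
  | some start =>
    let tail := PySem.List.slice lines (some ((start : Int) + 1)) none
    let bodyLen := (tail.findIdx? (fun l => PySem.Str.strip l == "")).getD tail.length
    PySem.Str.join "\n" (PySem.List.slice lines (some (start : Int)) (some ((start : Int) + 2 + bodyLen)))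

-- ===== PRECONDITION & SPEC =====
-- Pre_ excludes exactly the inputs on which A raises KeyError: the dict lacks the key
-- 'entry_point' AND some line contains 'def ' (only then does A evaluate example['entry_point']).
def Pre_extract_function_py (generated_code : String) (example_ : List (String × String)) : Prop :=
  "entry_point" ∈ example_.map Prod.fst ∨
    ∀ l ∈ (PySem.Str.split? generated_code "\n").getD [], PySem.Str.isIn "def " l = false
instance (generated_code : String) (example_ : List (String × String)) : Decidable (Pre_extract_function_py generated_code example_) := by unfold Pre_extract_function_py; infer_instance
def pvWitness_extract_function_py : String × (List (String × String)) :=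
  ("def f():\n  return 1\n\nprint(f())", [("entry_point", "f")])
def Spec_extract_function_py (generated_code : String) (example_ : List (String × String)) (out : String) : Prop := out = extract_function_py_alt generated_code example_
instance (generated_code : String) (example_ : List (String × String)) (out : String) : Decidable (Spec_extract_function_py generated_code example_ out) := by unfold Spec_extract_function_py; infer_instance

-- ===== CLAIM (what is proved, stated in full; the proofs are below) =====
def Claim_equal_extract_function_py : Prop := ∀ (generated_code : String) (example_ : List (String × String)), Dom_extract_function_py generated_code example_ → Pre_extract_function_py generated_code example_ → Spec_extract_function_py generated_code example_ (extract_function_py generated_code example_)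

-- ===== LEMMAS AND PROOFS =====

-- the block collected once `in_function` is true: everything up to and including the first blank line
def pvBlockTail : List String → List String
  | [] => []
  | l :: ls => if PySem.Str.strip l == "" then [l] else l :: pvBlockTail ls

theorem pvLoopA_true (entry : String) (ls : List String) :
    ∀ acc : List String, acc ≠ [] → pvLoopA entry ls acc true = acc ++ pvBlockTail ls := by
  induction ls with
  | nil => intro acc _; simp [pvLoopA, pvBlockTail]
  | cons l ls ih =>
    intro acc hacc
    have hlen1 : 1 ≤ acc.length := List.length_pos_iff.mpr hacc
    have hinf : (if (PySem.Str.isIn "def " l && PySem.Str.isIn entry l) = true then true else true) = true := by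
      split <;> rfl
    cases hb : PySem.Str.strip l == "" with
    | true =>
      have hc : (PySem.Str.strip l == "" && decide ((acc ++ [l]).length > 1)) = true := by
        rw [hb, Bool.true_and, decide_eq_true_eq]
        simp only [List.length_append, List.length_cons, List.length_nil]
        omega
      simp [pvLoopA, pvBlockTail, hb]
      intro h
      exact absurd h hacc
    | false =>
      have hc : (PySem.Str.strip l == "" && decide ((acc ++ [l]).length > 1)) = false := by
        rw [hb, Bool.false_and]
      simp only [pvLoopA, pvBlockTail, hinf, Bool.false_eq_true, if_false, hb]
      rw [ih (acc ++ [l]) (by simp)]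
      simp

theorem pvLoopA_eq (entry : String) (ls : List String) :
    pvLoopA entry ls [] false =
      match ls.findIdx? (fun l => PySem.Str.isIn "def " l && PySem.Str.isIn entry l) with
      | none => []
      | some s => (ls.drop s).take 1 ++ pvBlockTail (ls.drop (s + 1)) := by
  induction ls with
  | nil => simp [pvLoopA]
  | cons l ls ih =>
    rw [List.findIdx?_cons]
    cases hp : PySem.Str.isIn "def " l && PySem.Str.isIn entry l with
    | true =>
      have hc : (PySem.Str.strip l == "" && decide (([] ++ [l] : List String).length > 1)) = false := by
        simp
      simp only [pvLoopA, hp, Bool.false_eq_true, if_true, hc, if_false]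
      rw [pvLoopA_true entry ls ([] ++ [l]) (by simp)]
      simp
    | false =>
      simp only [pvLoopA, hp, Bool.false_eq_true, if_false]
      rw [ih]
      cases h : ls.findIdx? (fun l => PySem.Str.isIn "def " l && PySem.Str.isIn entry l) with
      | none => simp
      | some s => simp [List.drop_succ_cons]

theorem pvBlockTail_eq_take (ls : List String) :
    pvBlockTail ls =
      ls.take (((ls.findIdx? (fun l => PySem.Str.strip l == "")).getD ls.length) + 1) := by
  induction ls with
  | nil => simp [pvBlockTail]
  | cons l ls ih =>
    rw [List.findIdx?_cons]
    cases hb : PySem.Str.strip l == "" with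
    | true => simp [pvBlockTail, hb]
    | false =>
      simp only [pvBlockTail, hb, Bool.false_eq_true, if_false]
      cases h : ls.findIdx? (fun l => PySem.Str.strip l == "") with
      | none => simp [ih, h]
      | some s => simp [ih, h]

-- ===== VERDICT (by name: the statement is the Claim_ definition above) =====
theorem extract_function_py_spec : Claim_equal_extract_function_py := by
  intro generated_code example_ _ _
  unfold Spec_extract_function_py extract_function_py extract_function_py_alt
  set entry := ((PySem.Dict.mk example_).get? "entry_point").getD "" with hentry
  dsimp only
  rw [pvLoopA_eq]
  cases hf : ((PySem.Str.split? generated_code "\n").getD []).findIdx?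
      (fun l => PySem.Str.isIn "def " l && PySem.Str.isIn entry l) with
  | none => simp
  | some s =>
    set lines := (PySem.Str.split? generated_code "\n").getD [] with hlines
    have hs : s < lines.length := by
      rcases List.findIdx?_eq_some_iff_findIdx_eq.mp hf with ⟨h, _⟩
      exact h
    have hdrop : lines.drop s = lines[s] :: lines.drop (s + 1) := List.drop_eq_getElem_cons hs
    have htail : PySem.List.slice lines (some ((s : Int) + 1)) none = lines.drop (s + 1) := by
      rw [PySem.List.slice_from lines (a := (s : Int) + 1) (by positivity)]
      norm_num
    set k := ((lines.drop (s+1)).findIdx? (fun l => PySem.Str.strip l == "")).getD (lines.drop (s+1)).length with hk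
    have hslice : PySem.List.slice lines (some (s : Int)) (some ((s : Int) + 2 + (k : Int))) =
        (lines.drop s).take (2 + k) := by
      have harg : (s : Int) + 2 + (k : Int) = ((s + 2 + k : Nat) : Int) := by push_cast; ring
      rw [harg, PySem.List.slice_natCast]
      congr 1
      omega
    have hA : ((lines.drop s).take 1 ++ pvBlockTail (lines.drop (s + 1))) =
        (lines.drop s).take (2 + k) := by
      rw [pvBlockTail_eq_take, ← hk, hdrop]
      have h2 : 2 + k = (1 + k) + 1 := by omega
      rw [h2, List.take_succ_cons]
      simp [Nat.add_comm]
      rw [hdrop, Nat.add_comm 1 (1 + k), List.take_succ_cons]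
    have hne : ((lines.drop s).take 1 ++ pvBlockTail (lines.drop (s + 1))).isEmpty = false := by
      rw [hdrop]
      rfl
    simp only [htail, ← hk, hslice]
    rw [hne]
    simp only [Bool.false_eq_true, if_false, hA]
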